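-- pv_equiv track=rewrite | github.com/alexro/pypypy | code_forces/1454B.py | find
-- ===== SOURCE A (Python) =====
-- def find(a):
--     dic = {}
--     for i, v in enumerate(a):
--         dic[v] = dic[v][0] + 1 if v in dic else 1, i
--     m = len(a) + 1
--     pos = -1
--     for i, v in enumerate(dic):
--         if dic[v][0] == 1 and v < m:
--             m = v
--             pos = dic[v][1]
--     return pos if pos == -1 else pos + 1
-- ===== SOURCE B (Python) =====
-- def find(a):
--     # sort, then a single neighbour scan: in a sorted list a value occurs
--     # exactly once iff it differs from both its neighbours; the first such
--     # value is the smallest one, and a.index gives its original position.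
--     s = sorted(a)
--     prev = None
--     for j, v in enumerate(s):
--         nxt = s[j + 1] if j + 1 < len(s) else None
--         if v != prev and v != nxt:
--             return a.index(v) + 1
--         prev = v
--     return -1
-- ===== Notes on version B (the rewrite author's own statement) =====
-- stated objective: alternative
-- what changed: Replaces A's index-carrying frequency dict and its keyed running-minimum scan with sort-then-neighbour-scan: after sorting, a value is unique iff it differs from both neighbours, and the first such value in sorted order is the answer; B also drops A's accidental 'value < len(a)+1' cap.
-- intended difference: On lists that contain a value occurring exactly once but where every such value exceeds len(a), A returns -1 (its running minimum starts at len(a)+1, an artefact of the contest's a_i<=n constraint) while B returns the 1-based position of the smallest unique value, which is the intended answer for arbitrary integer input. — e.g. on find([100]): A returns -1, B returns 1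
import Mathlib
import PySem

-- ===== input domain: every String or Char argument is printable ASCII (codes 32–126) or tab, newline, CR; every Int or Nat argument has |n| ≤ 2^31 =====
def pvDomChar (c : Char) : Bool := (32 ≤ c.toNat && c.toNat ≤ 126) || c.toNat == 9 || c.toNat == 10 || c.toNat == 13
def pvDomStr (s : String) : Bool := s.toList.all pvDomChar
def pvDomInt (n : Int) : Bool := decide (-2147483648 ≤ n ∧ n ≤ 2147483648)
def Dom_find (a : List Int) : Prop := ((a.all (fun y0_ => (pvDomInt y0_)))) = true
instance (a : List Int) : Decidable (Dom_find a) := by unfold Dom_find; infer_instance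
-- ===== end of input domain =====

-- B replaces A's index-carrying frequency dict + keyed min-scan with sort-then-neighbour-scan
-- (a sorted value is unique iff it differs from both neighbours), and drops A's accidental
-- `value < len(a)+1` cap (see D_find below). Return value only; no mutation.

-- ===== PORT A =====
-- one step of A's first loop: dic[v] = (dic[v][0] + 1 if v in dic else 1, i);
-- `dic[v]` is only read under `v in dic`, so `getD _ (0, 0)` is exact there.
def stepA (d : PySem.Dict Int (Int × Int)) (iv : Int × Int) : PySem.Dict Int (Int × Int) :=
  d.insert iv.2 ((if d.contains iv.2 then (d.getD iv.2 (0, 0)).1 + 1 else 1), iv.1)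

-- one step of A's second loop over the dict's keys (g v = dic[v]); the `i` of that loop is unused
def stepSel (g : Int → Int × Int) (mp : Int × Int) (v : Int) : Int × Int :=
  if (g v).1 == 1 && v < mp.1 then (v, (g v).2) else mp

def find (a : List Int) : Int :=
  let dic := (PySem.List.enumerate a 0).foldl stepA PySem.Dict.empty
  let mp := dic.keys.foldl (stepSel (fun v => dic.getD v (0, 0))) ((a.length : Int) + 1, -1)
  if mp.2 == -1 then mp.2 else mp.2 + 1

-- ===== PORT B =====
-- B's neighbour scan over the sorted list: prev = s[j-1] (none at j = 0),
-- rest.head? = s[j+1] (none at the last position); `a.index(v)` cannot raise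
-- since v ∈ sorted(a) ⊆ a, so the `none` branch is unreachable.
def scanB (a : List Int) : Option Int → List Int → Int
  | _, [] => -1                -- loop fell through: return -1
  | prev, v :: rest =>
    if prev ≠ some v ∧ rest.head? ≠ some v then
      match PySem.List.index? a v with
      | some k => (k : Int) + 1     -- return a.index(v) + 1
      | none => -1                  -- unreachable
    else scanB a (some v) rest

def find_alt (a : List Int) : Int :=
  scanB a none (PySem.List.sorted a (fun x => x) false)

-- ===== PRECONDITION & SPEC =====
-- On lists having a uniquely-occurring value but whose every uniquely-occurring value exceeds
-- len(a), A returns -1 (its running minimum starts at len(a)+1, an artefact of the contest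
-- constraint a_i ≤ n) while B returns the 1-based position of the smallest uniquely-occurring
-- value, the intended answer for arbitrary integer input.
def D_find (a : List Int) : Prop :=
  (∃ x ∈ a, a.count x = 1) ∧ ∀ x ∈ a, a.count x = 1 → (a.length : Int) < x
instance (a : List Int) : Decidable (D_find a) := by unfold D_find; infer_instance

def Spec_find (a : List Int) (out : Int) : Prop := ¬ D_find a → out = find_alt a
instance (a : List Int) (out : Int) : Decidable (Spec_find a out) := by unfold Spec_find; infer_instance

def pvDiffWitness_find : List Int := [100]
def pvDiffWitnessOut_find : Int × Int := (-1, 1)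

-- ===== CLAIM (what is proved, stated in full; the proofs are below) =====
def Claim_unchanged_find : Prop := ∀ (a : List Int), Dom_find a → Spec_find a (find a)
def Claim_changed_find : Prop := Dom_find (pvDiffWitness_find) ∧ D_find (pvDiffWitness_find) ∧ find (pvDiffWitness_find) = pvDiffWitnessOut_find.1 ∧ find_alt (pvDiffWitness_find) = pvDiffWitnessOut_find.2 ∧ pvDiffWitnessOut_find.1 ≠ pvDiffWitnessOut_find.2
def Claim_exact_find : Prop := ∀ (a : List Int), Dom_find a → D_find a → find a ≠ find_alt a

-- ===== LEMMAS AND PROOFS =====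

-- the dict built by A's first loop
def dicA (a : List Int) : PySem.Dict Int (Int × Int) :=
  (PySem.List.enumerate a 0).foldl stepA PySem.Dict.empty

theorem keys_dicA (a : List Int) : (dicA a).keys = PySem.Set.ofList a := by
  unfold dicA stepA
  rw [PySem.Dict.keys_foldl_insert_key (PySem.List.enumerate a 0) (fun iv => iv.2)
      (fun d iv => ((if d.contains iv.2 then (d.getD iv.2 (0, 0)).1 + 1 else 1), iv.1))]
  rw [PySem.Dict.keys_empty, PySem.Set.update_nil_left, PySem.List.map_snd_enumerate]

theorem dicA_fst (l : List (Int × Int)) (d : PySem.Dict Int (Int × Int)) (v : Int) :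
    ((l.foldl stepA d).getD v (0, 0)).1
      = (d.getD v (0, 0)).1 + ((l.map Prod.snd).count v : Int) := by
  induction l generalizing d with
  | nil => simp
  | cons p t ih =>
    rw [List.foldl_cons, ih]
    by_cases hv : v = p.2
    · rw [hv]
      have hins : (stepA d p).getD p.2 (0, 0)
          = ((if d.contains p.2 then (d.getD p.2 (0, 0)).1 + 1 else 1), p.1) :=
        PySem.Dict.getD_insert_self d p.2 _ _
      rw [hins]
      by_cases hc : d.contains p.2 = true
      · simp only [hc, if_true, List.map_cons, List.count_cons_self]
        push_cast; ring
      · rw [PySem.Dict.getD_of_not_contains d (0, 0)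
            (show d.contains p.2 = false by simpa using hc)]
        simp only [hc, List.map_cons, List.count_cons_self]
        push_cast; ring
    · have hins : (stepA d p).getD v (0, 0) = d.getD v (0, 0) := by
        simp [stepA, PySem.Dict.getD_insert, hv]
      rw [hins, List.map_cons]
      simp [Ne.symm hv]

theorem dicA_untouched (l : List (Int × Int)) (d : PySem.Dict Int (Int × Int)) (v : Int)
    (h : v ∉ l.map Prod.snd) :
    (l.foldl stepA d).getD v (0, 0) = d.getD v (0, 0) := by
  induction l generalizing d with
  | nil => simp
  | cons p t ih =>
    simp only [List.map_cons, List.mem_cons, not_or] at h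
    rw [List.foldl_cons, ih _ h.2]
    simp [stepA, PySem.Dict.getD_insert, h.1]

theorem count_dicA (a : List Int) (v : Int) :
    ((dicA a).getD v (0, 0)).1 = (a.count v : Int) := by
  unfold dicA
  rw [dicA_fst, PySem.Dict.getD_empty, PySem.List.map_snd_enumerate]
  simp

theorem idx_dicA (a : List Int) (v : Int) (h : a.count v = 1) :
    ∃ k : Nat, PySem.List.index? a v = some k ∧ ((dicA a).getD v (0, 0)).2 = (k : Int) := by
  have hv : v ∈ a := List.count_pos_iff.mp (by omega)
  obtain ⟨k, hk⟩ := Option.isSome_iff_exists.mp ((PySem.List.index?_isSome_iff a v).mpr hv)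
  refine ⟨k, hk, ?_⟩
  obtain ⟨pre, suf, ha, hlen, hpre⟩ := (PySem.List.index?_eq_some_iff a v k).mp hk
  have hsuf : v ∉ suf := by
    have hcnt : pre.count v + (suf.count v + 1) = 1 := by
      have := h; rw [ha, List.count_append, List.count_cons_self] at this; omega
    exact List.count_eq_zero.mp (by omega)
  subst ha
  unfold dicA
  rw [PySem.List.enumerate_append, List.foldl_append, PySem.List.enumerate_cons,
    List.foldl_cons,
    dicA_untouched _ _ v (by rw [PySem.List.map_snd_enumerate]; exact hsuf)]
  show ((stepA _ _).getD v (0, 0)).2 = (k : Int)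
  unfold stepA
  rw [PySem.Dict.getD_insert_self]
  simp [hlen]

-- characterization of A's running-minimum loop over an arbitrary key list
theorem sel_spec (g : Int → Int × Int) (K : List Int) : ∀ (m0 pos0 : Int),
    K.foldl (stepSel g) (m0, pos0) =
      (match (K.filter (fun v => (g v).1 == 1 && v < m0)).min? with
      | none => (m0, pos0)
      | some M => (M, (g M).2)) := by
  induction K with
  | nil => intro m0 pos0; simp
  | cons v K' ih =>
    intro m0 pos0
    rw [List.foldl_cons]
    by_cases hc : (g v).1 = 1 ∧ v < m0
    · have hstep : stepSel g (m0, pos0) v = (v, (g v).2) := by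
        simp [stepSel, hc.1, hc.2]
      rw [hstep, ih v (g v).2, List.filter_cons_of_pos (by simp [hc.1, hc.2])]
      rcases hmin : (K'.filter (fun x => (g x).1 == 1 && x < v)).min? with _ | M
      · have hemp : K'.filter (fun x => (g x).1 == 1 && decide (x < v)) = [] :=
          List.min?_eq_none_iff.mp hmin
        have : (v :: K'.filter (fun x => (g x).1 == 1 && decide (x < m0))).min? = some v := by
          refine List.min?_eq_some_iff.mpr ⟨List.mem_cons_self, ?_⟩
          intro b hb
          rcases List.mem_cons.mp hb with rfl | hb
          · exact le_refl _
          · simp only [List.mem_filter, beq_iff_eq, Bool.and_eq_true, decide_eq_true_eq] at hb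
            by_contra hlt
            have : b ∈ K'.filter (fun x => (g x).1 == 1 && decide (x < v)) :=
              List.mem_filter.mpr ⟨hb.1, by simp [hb.2.1]; omega⟩
            rw [hemp] at this; exact absurd this (List.not_mem_nil)
        rw [this]
      · obtain ⟨hMmem, hMmin⟩ := List.min?_eq_some_iff.mp hmin
        simp only [List.mem_filter, beq_iff_eq, Bool.and_eq_true, decide_eq_true_eq] at hMmem
        have : (v :: K'.filter (fun x => (g x).1 == 1 && decide (x < m0))).min? = some M := by
          refine List.min?_eq_some_iff.mpr ⟨?_, ?_⟩
          · exact List.mem_cons.mpr (Or.inr (List.mem_filter.mpr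
              ⟨hMmem.1, by simp [hMmem.2.1]; omega⟩))
          · intro b hb
            rcases List.mem_cons.mp hb with rfl | hb
            · exact le_of_lt hMmem.2.2
            · simp only [List.mem_filter, beq_iff_eq, Bool.and_eq_true, decide_eq_true_eq] at hb
              by_cases hbv : b < v
              · exact hMmin b (List.mem_filter.mpr ⟨hb.1, by simp [hb.2.1]; omega⟩)
              · have : M < v := hMmem.2.2; omega
        rw [this]
    · have hstep : stepSel g (m0, pos0) v = (m0, pos0) := by
        rcases Decidable.not_and_iff_or_not.mp hc with h1 | h2
        · simp [stepSel, h1]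
        · simp [stepSel, h2]
      have hfilt : ((v :: K').filter (fun x => (g x).1 == 1 && x < m0))
          = K'.filter (fun x => (g x).1 == 1 && x < m0) := by
        refine List.filter_cons_of_neg ?_
        rcases Decidable.not_and_iff_or_not.mp hc with h1 | h2
        · simp [h1]
        · simp [h2]
      rw [hstep, ih m0 pos0, hfilt]

-- closed description of A's result
theorem find_eq (a : List Int) :
    find a =
      (match ((PySem.Set.ofList a).filter
          (fun v => ((dicA a).getD v (0, 0)).1 == 1 && v < (a.length : Int) + 1)).min? with
      | none => -1
      | some M =>
        if (((dicA a).getD M (0, 0)).2 == -1) = true then ((dicA a).getD M (0, 0)).2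
        else ((dicA a).getD M (0, 0)).2 + 1) := by
  have h : find a =
      (if ((dicA a).keys.foldl (stepSel (fun v => (dicA a).getD v (0, 0)))
          ((a.length : Int) + 1, -1)).2 == -1
       then ((dicA a).keys.foldl (stepSel (fun v => (dicA a).getD v (0, 0)))
          ((a.length : Int) + 1, -1)).2
       else ((dicA a).keys.foldl (stepSel (fun v => (dicA a).getD v (0, 0)))
          ((a.length : Int) + 1, -1)).2 + 1) := rfl
  rw [h, keys_dicA, sel_spec]
  cases hmm : ((PySem.Set.ofList a).filter
      (fun v => ((dicA a).getD v (0, 0)).1 == 1 && v < (a.length : Int) + 1)).min? with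
  | none => simp
  | some M => simp

-- in a sorted cons-list, the head occurs in the tail iff it is the tail's head
theorem head_of_mem_sorted (v : Int) (rest : List Int)
    (hs : (v :: rest).Pairwise (· ≤ ·)) (hm : v ∈ rest) : rest.head? = some v := by
  cases rest with
  | nil => exact absurd hm (List.not_mem_nil)
  | cons h t =>
    have hvh : v ≤ h := (List.pairwise_cons.mp hs).1 h List.mem_cons_self
    rcases List.mem_cons.mp hm with rfl | hmt
    · rfl
    · have hhv : h ≤ v :=
        (List.pairwise_cons.mp ((List.pairwise_cons.mp hs).2)).1 v hmt
      simp [le_antisymm hvh hhv]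

-- characterization of B's neighbour scan
theorem scanB_eq (a : List Int) (s : List Int) (prev : Option Int)
    (hs : s.Pairwise (· ≤ ·))
    (hlo : ∀ p, prev = some p → ∀ x ∈ s, p ≤ x)
    (hne : ∀ v ∈ s, prev ≠ some v → a.count v = s.count v)
    (heq : ∀ v ∈ s, prev = some v → s.count v < a.count v) :
    scanB a prev s =
      (match (s.filter (fun v => a.count v == 1)).head? with
      | none => -1
      | some m =>
        match PySem.List.index? a m with
        | some k => (k : Int) + 1
        | none => -1) := by
  induction s generalizing prev with
  | nil => simp [scanB]
  | cons v rest ih =>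
    have hrest : rest.Pairwise (· ≤ ·) := (List.pairwise_cons.mp hs).2
    have hvle : ∀ x ∈ rest, v ≤ x := (List.pairwise_cons.mp hs).1
    by_cases hcnt : a.count v = 1
    · -- v is the answer: show the scan returns here
      have hprev : prev ≠ some v := by
        intro hp
        have h1 := heq v List.mem_cons_self hp
        rw [hcnt, List.count_cons_self] at h1
        omega
      have hscnt : (v :: rest).count v = 1 := by
        rw [← hne v List.mem_cons_self hprev]; exact hcnt
      have hvrest : v ∉ rest := by
        intro hm
        have := List.count_pos_iff.mpr hm
        simp [List.count_cons_self] at hscnt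
        omega
      have hnxt : rest.head? ≠ some v := by
        intro hh
        exact hvrest (by cases rest with
          | nil => simp at hh
          | cons h t => simp at hh; simp [hh])
      have : scanB a prev (v :: rest) =
          match PySem.List.index? a v with
          | some k => (k : Int) + 1
          | none => -1 := by
        simp only [scanB]
        rw [if_pos ⟨hprev, hnxt⟩]
      rw [this, List.filter_cons_of_pos (by simp [hcnt])]
      simp
    · -- v is not unique: the scan skips it
      have hcond : ¬ (prev ≠ some v ∧ rest.head? ≠ some v) := by
        intro ⟨h1, h2⟩
        have hvrest : v ∉ rest := fun hm => h2 (head_of_mem_sorted v rest hs hm)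
        have : a.count v = (v :: rest).count v := hne v List.mem_cons_self h1
        rw [List.count_cons_self, List.count_eq_zero.mpr hvrest] at this
        exact hcnt (by omega)
      have hstep : scanB a prev (v :: rest) = scanB a (some v) rest := by
        simp only [scanB]
        rw [if_neg hcond]
      rw [hstep, List.filter_cons_of_neg (by simp [hcnt])]
      refine ih (some v) hrest ?_ ?_ ?_
      · intro p hp x hx
        cases hp; exact hvle x hx
      · intro x hx hxv
        have hxv' : x ≠ v := fun h => hxv (by rw [h])
        have hpx : prev ≠ some x := by
          intro hp
          have h1 := hlo x hp v List.mem_cons_self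
          have h2 := hvle x hx
          exact hxv' (le_antisymm h1 h2)
        have := hne x (List.mem_cons_of_mem v hx) hpx
        rw [this]
        simp [Ne.symm hxv']
      · intro x hx hxv
        cases hxv
        have hsc : (v :: rest).count v = rest.count v + 1 := by
          rw [List.count_cons_self]
        by_cases hp : prev = some v
        · have := heq v List.mem_cons_self hp
          omega
        · have := hne v List.mem_cons_self hp
          omega

-- closed description of B's result
theorem find_alt_eq (a : List Int) :
    find_alt a =
      (match ((PySem.List.sorted a (fun x => x) false).filter (fun v => a.count v == 1)).head? with
      | none => -1
      | some m =>
        match PySem.List.index? a m with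
        | some k => (k : Int) + 1
        | none => -1) := by
  unfold find_alt
  refine scanB_eq a _ none ?_ ?_ ?_ ?_
  · exact PySem.List.sorted_pairwise a (fun x => x)
  · intro p hp; exact absurd hp (by simp)
  · intro v hv _
    exact ((PySem.List.sorted_perm a (fun x => x) false).count_eq v).symm
  · intro v hv hp; exact absurd hp (by simp)

-- the filtered sorted list: permutation of a's uniques and sorted
theorem filt_perm (a : List Int) :
    ((PySem.List.sorted a (fun x => x) false).filter (fun v => a.count v == 1)).Perm
      (a.filter (fun v => a.count v == 1)) :=
  (PySem.List.sorted_perm a (fun x => x) false).filter _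

theorem filt_sorted (a : List Int) :
    ((PySem.List.sorted a (fun x => x) false).filter (fun v => a.count v == 1)).Pairwise (· ≤ ·) :=
  (PySem.List.sorted_pairwise a (fun x => x)).sublist List.filter_sublist

-- ===== VERDICT (by name: the statement is the Claim_ definition above) =====
theorem find_spec : Claim_unchanged_find := by
  intro a _ hnd
  show find a = find_alt a
  rw [find_eq a, find_alt_eq a]
  rcases hh : ((PySem.List.sorted a (fun x => x) false).filter (fun v => a.count v == 1)).head?
      with _ | m
  · -- no value occurs exactly once: both return -1
    have hF : (PySem.List.sorted a (fun x => x) false).filter (fun v => a.count v == 1) = [] :=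
      List.head?_eq_none_iff.mp hh
    have hU : a.filter (fun v => a.count v == 1) = [] :=
      List.Perm.eq_nil (hF ▸ (filt_perm a).symm)
    have hT : (PySem.Set.ofList a).filter
        (fun v => ((dicA a).getD v (0, 0)).1 == 1 && v < (a.length : Int) + 1) = [] := by
      refine List.eq_nil_iff_forall_not_mem.mpr (fun v hvmem => ?_)
      simp only [List.mem_filter, count_dicA, beq_iff_eq, Bool.and_eq_true,
        decide_eq_true_eq, PySem.Set.mem_ofList] at hvmem
      have hvc : a.count v = 1 := by exact_mod_cast hvmem.2.1
      have : v ∈ a.filter (fun v => a.count v == 1) :=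
        List.mem_filter.mpr ⟨hvmem.1, by simp [hvc]⟩
      rw [hU] at this; exact absurd this (List.not_mem_nil)
    rw [hT]
    rfl
  · -- m = smallest uniquely-occurring value
    have hmF : m ∈ (PySem.List.sorted a (fun x => x) false).filter (fun v => a.count v == 1) :=
      List.mem_of_mem_head? hh
    have hmc : a.count m = 1 := by
      have := (List.mem_filter.mp hmF).2; simpa using this
    have hma : m ∈ a := (filt_perm a).mem_iff.mp hmF |> List.mem_filter.mp |>.1
    have hmle : ∀ y ∈ a, a.count y = 1 → m ≤ y := by
      intro y hy hyc
      have hyF : y ∈ (PySem.List.sorted a (fun x => x) false).filter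
          (fun v => a.count v == 1) :=
        (filt_perm a).mem_iff.mpr (List.mem_filter.mpr ⟨hy, by simp [hyc]⟩)
      obtain ⟨t, ht⟩ := List.head?_eq_some_iff.mp hh
      rw [ht] at hyF
      rcases List.mem_cons.mp hyF with rfl | hyt
      · exact le_refl _
      · have := filt_sorted a
        rw [ht] at this
        exact (List.pairwise_cons.mp this).1 y hyt
    -- from ¬D_find: some uniquely-occurring value is ≤ len a, hence m ≤ len a
    have hmlen : m < (a.length : Int) + 1 := by
      rcases Decidable.not_and_iff_or_not.mp hnd with h1 | h2
      · exact absurd ⟨m, hma, hmc⟩ h1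
      · push Not at h2
        obtain ⟨x, hx, hxc, hxle⟩ := h2
        have := hmle x hx hxc
        omega
    have hT : ((PySem.Set.ofList a).filter
        (fun v => ((dicA a).getD v (0, 0)).1 == 1 && v < (a.length : Int) + 1)).min?
        = some m := by
      refine List.min?_eq_some_iff.mpr ⟨?_, ?_⟩
      · refine List.mem_filter.mpr ⟨(PySem.Set.mem_ofList a m).mpr hma, ?_⟩
        rw [count_dicA]
        simp [hmc, hmlen]
      · intro b hb
        simp only [List.mem_filter, count_dicA, beq_iff_eq, Bool.and_eq_true,
          decide_eq_true_eq, PySem.Set.mem_ofList] at hb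
        exact hmle b hb.1 (by exact_mod_cast hb.2.1)
    rw [hT]
    obtain ⟨k, hk, h2⟩ := idx_dicA a m hmc
    simp only [PySem.List.index?_eq_idxOf?] at hk
    simp [hk, h2, show ¬((k : Int) = -1) by omega]

theorem find_tight : Claim_exact_find := by
  intro a _ hD
  obtain ⟨⟨x, hx, hxc⟩, hall⟩ := hD
  -- A returns -1: its filtered candidate list is empty
  have hT : (PySem.Set.ofList a).filter
      (fun v => ((dicA a).getD v (0, 0)).1 == 1 && v < (a.length : Int) + 1) = [] := by
    refine List.eq_nil_iff_forall_not_mem.mpr (fun v hvmem => ?_)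
    simp only [List.mem_filter, count_dicA, beq_iff_eq, Bool.and_eq_true,
      decide_eq_true_eq, PySem.Set.mem_ofList] at hvmem
    have := hall v hvmem.1 (by exact_mod_cast hvmem.2.1)
    omega
  have hA : find a = -1 := by rw [find_eq a, hT]; rfl
  -- B returns a positive position
  have hxF : x ∈ (PySem.List.sorted a (fun x => x) false).filter (fun v => a.count v == 1) :=
    (filt_perm a).mem_iff.mpr (List.mem_filter.mpr ⟨hx, by simp [hxc]⟩)
  rw [hA, find_alt_eq a]
  rcases hh : ((PySem.List.sorted a (fun x => x) false).filter (fun v => a.count v == 1)).head?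
      with _ | m
  · rw [List.head?_eq_none_iff.mp hh] at hxF
    exact absurd hxF (List.not_mem_nil)
  · have hmF : m ∈ (PySem.List.sorted a (fun x => x) false).filter (fun v => a.count v == 1) :=
      List.mem_of_mem_head? hh
    have hma : m ∈ a := (filt_perm a).mem_iff.mp hmF |> List.mem_filter.mp |>.1
    obtain ⟨k, hk⟩ := Option.isSome_iff_exists.mp ((PySem.List.index?_isSome_iff a m).mpr hma)
    simp only [PySem.List.index?_eq_idxOf?] at hk
    simp [hk]
    intro hcontra
    have hk0 : (0 : Int) ≤ (k : Int) := Int.natCast_nonneg k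
    linarith

theorem find_changed : Claim_changed_find := by unfold Claim_changed_find; decide
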